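-- pv_equiv track=rewrite | github.com/acetra19/SocialAcademyPresentation | setter_commissions.py | first_occurrence_indices
-- ===== SOURCE A (Python) =====
-- from typing import Any, Dict, List, Optional, Set, Tuple
--
-- def first_occurrence_indices(source: List[Dict[str, Any]]) -> Dict[str, int]:
--     first: Dict[str, int] = {}
--     for i, row in enumerate(source):
--         did = row.get("deal_id")
--         if not isinstance(did, str):
--             continue
--         key = did.strip()
--         if key not in first:
--             first[key] = i
--     return first
-- ===== SOURCE B (Python) =====
-- from typing import Any, Dict, List
--
--
-- def first_occurrence_indices(source: List[Dict[str, Any]]) -> Dict[str, int]: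
--     # Flatten first, then keep a pair exactly when its key never occurred earlier:
--     # no dict membership state is maintained during the scan.
--     pairs = [(did.strip(), i)
--              for i, row in enumerate(source)
--              if isinstance(did := row.get("deal_id"), str)]
--     return {k: i for j, (k, i) in enumerate(pairs)
--             if all(pk != k for pk, _ in pairs[:j])}
-- ===== Notes on version B (the rewrite author's own statement) =====
-- stated objective: alternative
-- what changed: B first flattens the rows into a plain list of (stripped key, index) pairs, then builds the result by keeping each pair whose key does not occur among the earlier pairs, instead of A's single pass that maintains a dict and tests membership in it.
import Mathlib
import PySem

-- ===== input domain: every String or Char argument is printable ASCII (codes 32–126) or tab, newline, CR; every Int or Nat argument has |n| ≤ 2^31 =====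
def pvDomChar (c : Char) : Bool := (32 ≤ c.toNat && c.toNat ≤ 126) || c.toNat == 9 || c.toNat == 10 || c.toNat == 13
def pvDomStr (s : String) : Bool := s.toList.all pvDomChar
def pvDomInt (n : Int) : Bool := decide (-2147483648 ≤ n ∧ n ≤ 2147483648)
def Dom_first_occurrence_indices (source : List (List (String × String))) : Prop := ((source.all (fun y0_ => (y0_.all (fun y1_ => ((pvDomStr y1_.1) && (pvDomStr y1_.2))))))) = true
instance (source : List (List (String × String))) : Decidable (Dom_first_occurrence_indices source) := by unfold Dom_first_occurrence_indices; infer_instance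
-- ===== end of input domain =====

-- ===== PORT A =====
-- B flattens to a pair list and keeps pairs whose key has no earlier occurrence (no dict
-- maintained during the scan); A keeps a dict and tests membership in it. Same results; neither faster.
def first_occurrence_indices (source : List (List (String × String))) : List (String × Int) :=
  ((PySem.List.enumerate source).foldl
    (fun (first : PySem.Dict String Int) p =>
      match (PySem.Dict.mk p.2).get? "deal_id" with
      | none => first
      | some did =>
        let key := PySem.Str.strip did
        if first.contains key then first else first.insert key p.1)
    PySem.Dict.empty).items

-- ===== PORT B =====
def pvPairs (source : List (List (String × String))) : List (String × Int) :=
  (PySem.List.enumerate source).filterMap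
    (fun p => ((PySem.Dict.mk p.2).get? "deal_id").map (fun did => (PySem.Str.strip did, p.1)))

-- 'all(pk != k for pk, _ in pairs[:j])': recursion carrying the already-seen prefix of pairs
def pvKeepFirsts (prev : List (String × Int)) : List (String × Int) → List (String × Int)
  | [] => []
  | (k, i) :: rest =>
    (if prev.any (fun q => q.1 == k) then [] else [(k, i)]) ++ pvKeepFirsts (prev ++ [(k, i)]) rest

def first_occurrence_indices_alt (source : List (List (String × String))) : List (String × Int) :=
  pvKeepFirsts [] (pvPairs source)

-- ===== PRECONDITION & SPEC =====
def Spec_first_occurrence_indices (source : List (List (String × String))) (out : List (String × Int)) : Prop := out = first_occurrence_indices_alt source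
instance (source : List (List (String × String))) (out : List (String × Int)) : Decidable (Spec_first_occurrence_indices source out) := by unfold Spec_first_occurrence_indices; infer_instance

-- ===== CLAIM (what is proved, stated in full; the proofs are below) =====
def Claim_equal_first_occurrence_indices : Prop := ∀ (source : List (List (String × String))), Dom_first_occurrence_indices source → Spec_first_occurrence_indices source (first_occurrence_indices source)

-- ===== LEMMAS AND PROOFS =====

-- A's loop body, restricted to the pairs that actually pass the isinstance filter
def pvStep (d : PySem.Dict String Int) (q : String × Int) : PySem.Dict String Int :=
  if d.contains q.1 then d else d.insert q.1 q.2

theorem foldA_eq_foldPairs (l : List (Int × List (String × String))) (d : PySem.Dict String Int) :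
    l.foldl
      (fun (first : PySem.Dict String Int) p =>
        match (PySem.Dict.mk p.2).get? "deal_id" with
        | none => first
        | some did =>
          let key := PySem.Str.strip did
          if first.contains key then first else first.insert key p.1)
      d
    = (l.filterMap
        (fun p => ((PySem.Dict.mk p.2).get? "deal_id").map (fun did => (PySem.Str.strip did, p.1)))).foldl
        pvStep d := by
  induction l generalizing d with
  | nil => rfl
  | cons p rest ih =>
    cases h : (PySem.Dict.mk p.2).get? "deal_id" with
    | none => simp [List.foldl, h, ih]
    | some did => simp [List.foldl, h, ih, pvStep]

theorem foldPairs_items (pairs : List (String × Int)) :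
    ∀ (d : PySem.Dict String Int) (prev : List (String × Int)),
      (∀ k, d.contains k = prev.any (fun q => q.1 == k)) →
      (pairs.foldl pvStep d).items = d.items ++ pvKeepFirsts prev pairs := by
  induction pairs with
  | nil => intro d prev _; simp [pvKeepFirsts]
  | cons q rest ih =>
    intro d prev hinv
    obtain ⟨k, i⟩ := q
    by_cases hc : d.contains k = true
    · have hp : prev.any (fun q => q.1 == k) = true := by rw [← hinv]; exact hc
      have hinv' : ∀ k', (d.contains k') = (prev ++ [(k, i)]).any (fun q => q.1 == k') := by
        intro k'
        rw [List.any_append, ← hinv]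
        by_cases hkk : k = k'
        · subst hkk; simp [hc]
        · simp [hkk]
      simp [List.foldl, pvStep, hc, pvKeepFirsts, hp, ih d (prev ++ [(k, i)]) hinv']
    · have hp : prev.any (fun q => q.1 == k) = false := by
        rw [← hinv]; exact Bool.not_eq_true _ ▸ (by simpa using hc)
      have hinv' : ∀ k', ((d.insert k i).contains k') = (prev ++ [(k, i)]).any (fun q => q.1 == k') := by
        intro k'
        rw [List.any_append, PySem.Dict.contains_insert, ← hinv]
        simp [Bool.or_comm, BEq.comm]
      have hitems : (d.insert k i).items = d.items ++ [(k, i)] :=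
        PySem.Dict.items_insert_of_not_contains d i (by simpa using hc)
      simp [List.foldl, pvStep, hc, pvKeepFirsts, hp,
        ih (d.insert k i) (prev ++ [(k, i)]) hinv', hitems]

-- ===== VERDICT (by name: the statement is the Claim_ definition above) =====
theorem first_occurrence_indices_spec : Claim_equal_first_occurrence_indices := by
  intro source _
  unfold Spec_first_occurrence_indices first_occurrence_indices first_occurrence_indices_alt pvPairs
  rw [foldA_eq_foldPairs]
  rw [foldPairs_items _ PySem.Dict.empty [] (by intro k; simp [PySem.Dict.contains_empty])]
  simp [PySem.Dict.empty]
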